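-- pv_equiv track=rewrite | github.com/m1tix/projectEuler | src/utils/utils.py | factor_all
-- ===== SOURCE A (Python) =====
-- from collections import defaultdict
--
-- def factor_all(b):
--     '''
--         Factor all numbers <= b.
--         Returns a dictionary of dicts whose keys are the numbers 2 to b
--         and the dictionary the prime factors together with their exponents.
--         Only use this for small b as O(b)...
--     '''
--     factor_list = defaultdict(dict)
--     for i in range(2, b + 1):
--         if not factor_list[i]:
--             for j in range(1, b // i + 1):
--                 if j % i == 0:
--                     factor_list[j * i][i] = factor_list[j][i] + 1
--                 else:
--                     factor_list[j * i][i] = 1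
--     return factor_list
-- ===== SOURCE B (Python) =====
-- from collections import defaultdict
--
-- def factor_all(b):
--     factor_list = defaultdict(dict)
--     for p in range(2, b + 1):
--         if p not in factor_list:
--             for m in range(p, b + 1, p):
--                 e, t = 0, m
--                 while t % p == 0:
--                     e += 1
--                     t //= p
--                 factor_list[m][p] = e
--     return factor_list
-- ===== Notes on version B (the rewrite author's own statement) =====
-- stated objective: alternative
-- what changed: A fills exponents by dynamic propagation (factor_list[j*i][i] = factor_list[j][i] + 1, scanning every j up to b//i with a j % i branch and reading back earlier entries); B steps directly over the multiples of each new prime via a stepped range and computes each exponent independently by repeated division, with a membership test replacing A's defaultdict truthiness probe.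
import Mathlib
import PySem

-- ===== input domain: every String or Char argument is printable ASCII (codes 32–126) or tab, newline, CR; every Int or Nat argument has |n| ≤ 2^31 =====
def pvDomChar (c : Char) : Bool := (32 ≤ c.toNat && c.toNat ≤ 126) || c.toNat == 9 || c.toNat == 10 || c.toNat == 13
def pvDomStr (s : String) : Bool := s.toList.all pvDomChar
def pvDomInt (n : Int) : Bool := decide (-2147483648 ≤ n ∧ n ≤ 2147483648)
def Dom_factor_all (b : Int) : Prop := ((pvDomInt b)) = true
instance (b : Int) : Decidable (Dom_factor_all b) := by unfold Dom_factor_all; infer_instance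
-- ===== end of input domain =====

-- B iterates multiples of each new prime directly (range step p) and computes each exponent by
-- direct repeated division, instead of A's propagation `factor_list[j*i][i] = factor_list[j][i] + 1`
-- over all j with a `j % i` branch; same cost class, plainer per-entry computation (objective: alternative).

-- ===== PORT A =====
-- the nested-dict state of the Python defaultdict(dict)
def pvInnerA (b i : Int) (d : PySem.Dict Int (PySem.Dict Int Int)) : PySem.Dict Int (PySem.Dict Int Int) :=
  (PySem.List.pyRange 1 (PySem.Int.floordiv b i + 1) 1).foldl (fun d j =>
    if PySem.Int.mod j i = 0 then
      -- `factor_list[j][i]`: the key i is always present in factor_list[j] here (j is a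
      -- multiple of i whose entry was set earlier in this same loop, at index j // i), so the
      -- KeyError branch of the plain inner-dict lookup is unreachable; 0 is a dummy default.
      let v := (d.getD j PySem.Dict.empty).getD i 0 + 1
      d.modify (j * i) PySem.Dict.empty (fun inner => inner.insert i v)
    else
      d.modify (j * i) PySem.Dict.empty (fun inner => inner.insert i 1)) d

def pvStepA (b : Int) (d : PySem.Dict Int (PySem.Dict Int Int)) (i : Int) :
    PySem.Dict Int (PySem.Dict Int Int) :=
  -- `factor_list[i]` on the defaultdict inserts {} when i is absent, before the truthiness test
  let d := if d.contains i then d else d.insert i PySem.Dict.empty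
  if (d.getD i PySem.Dict.empty).size = 0 then pvInnerA b i d else d

def factor_all (b : Int) : List (Int × List (Int × Int)) :=
  ((PySem.List.pyRange 2 (b + 1) 1).foldl (pvStepA b) PySem.Dict.empty).items.map
    (fun q => (q.1, q.2.items))

-- ===== PORT B =====
-- the `e, t = 0, m; while t % p == 0: e += 1; t //= p` loop; fuel m.natAbs is enough since
-- t starts at m ≥ p ≥ 2 at every call and strictly shrinks at each division
def pvBDivLoop (p e t : Int) : Nat → Int
  | 0 => e
  | Nat.succ fuel =>
      if PySem.Int.mod t p = 0 then pvBDivLoop p (e + 1) (PySem.Int.floordiv t p) fuel else e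

def pvInnerB (b p : Int) (d : PySem.Dict Int (PySem.Dict Int Int)) : PySem.Dict Int (PySem.Dict Int Int) :=
  (PySem.List.pyRange p (b + 1) p).foldl (fun d m =>
    d.modify m PySem.Dict.empty (fun inner => inner.insert p (pvBDivLoop p 0 m m.natAbs))) d

def pvStepB (b : Int) (d : PySem.Dict Int (PySem.Dict Int Int)) (p : Int) :
    PySem.Dict Int (PySem.Dict Int Int) :=
  if d.contains p then d else pvInnerB b p d

def factor_all_alt (b : Int) : List (Int × List (Int × Int)) :=
  ((PySem.List.pyRange 2 (b + 1) 1).foldl (pvStepB b) PySem.Dict.empty).items.map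
    (fun q => (q.1, q.2.items))

-- ===== PRECONDITION & SPEC =====
def Spec_factor_all (b : Int) (out : List (Int × List (Int × Int))) : Prop := out = factor_all_alt b
instance (b : Int) (out : List (Int × List (Int × Int))) : Decidable (Spec_factor_all b out) := by unfold Spec_factor_all; infer_instance

-- ===== CLAIM (what is proved, stated in full; the proofs are below) =====
def Claim_equal_factor_all : Prop := ∀ (b : Int), Dom_factor_all b → Spec_factor_all b (factor_all b)

-- ===== LEMMAS AND PROOFS =====

-- the p-adic valuation both programs compute (proof-side reference value)
def pvVal (p m : Int) : Int :=
  if h : 2 ≤ p ∧ 0 < m ∧ p ∣ m then pvVal p (m / p) + 1 else 0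
termination_by m.toNat
decreasing_by
  have h1 : 0 < m := h.2.1
  have h2 : 2 ≤ p := h.1
  have h3 : m / p < m := by
    apply Int.ediv_lt_of_lt_mul (by omega)
    nlinarith
  have h4 : 0 ≤ m / p := Int.ediv_nonneg (by omega) (by omega)
  omega

lemma pvVal_not_dvd {p m : Int} (h : ¬ p ∣ m) : pvVal p m = 0 := by
  rw [pvVal]; simp [h]

lemma pvVal_mul {p j : Int} (hp : 2 ≤ p) (hj : 0 < j) : pvVal p (j * p) = pvVal p j + 1 := by
  rw [pvVal]
  have hd : p ∣ j * p := ⟨j, mul_comm j p⟩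
  have hpos : 0 < j * p := by positivity
  rw [dif_pos ⟨hp, hpos, hd⟩, Int.mul_ediv_cancel j (by omega)]

lemma pvBDivLoop_eq {p : Int} (hp : 2 ≤ p) :
    ∀ (fuel : Nat) (e t : Int), 0 < t → t.natAbs ≤ fuel →
      pvBDivLoop p e t fuel = e + pvVal p t := by
  intro fuel
  induction fuel with
  | zero => intro e t ht hf; omega
  | succ fuel ih =>
    intro e t ht hf
    rw [pvBDivLoop]
    by_cases hm : PySem.Int.mod t p = 0
    · rw [if_pos hm]
      rw [PySem.Int.mod_eq_zero_iff_dvd] at hm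
      obtain ⟨c, rfl⟩ := hm
      have hc : 0 < c := by nlinarith
      have hdiv : PySem.Int.floordiv (p * c) p = c := by
        rw [PySem.Int.floordiv_eq_ediv_of_pos (by omega), Int.mul_ediv_cancel_left c (by omega)]
      have hcf : c.natAbs ≤ fuel := by
        have h1 := Int.natAbs_mul p c
        have h2 : 2 * c.natAbs ≤ p.natAbs * c.natAbs := Nat.mul_le_mul_right _ (by omega)
        omega
      rw [hdiv, ih (e + 1) c hc hcf]
      have : pvVal p (p * c) = pvVal p c + 1 := by rw [mul_comm, pvVal_mul (by omega) hc]
      omega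
    · rw [if_neg hm]
      simp only [PySem.Int.mod_eq_zero_iff_dvd] at hm
      rw [pvVal_not_dvd hm]
      omega

-- contains → the dict is nonempty
lemma pv_size_ne_zero_of_contains {κ ν : Type} [BEq κ] [LawfulBEq κ]
    (d : PySem.Dict κ ν) (k : κ) (h : d.contains k = true) : d.size ≠ 0 := by
  rw [PySem.Dict.contains_iff_mem_keys] at h
  simp only [PySem.Dict.keys, List.mem_map] at h
  obtain ⟨p, hp, -⟩ := h
  simp only [PySem.Dict.size]
  intro hlen
  rw [List.length_eq_zero_iff] at hlen
  rw [hlen] at hp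
  exact (List.not_mem_nil) hp

lemma pv_size_insert_ne_zero {κ ν : Type} [BEq κ] [LawfulBEq κ]
    (d : PySem.Dict κ ν) (k : κ) (v : ν) : (d.insert k v).size ≠ 0 := by
  rw [PySem.Dict.size_insert]
  split
  · exact pv_size_ne_zero_of_contains d k (by assumption)
  · omega

-- inserting twice at a fresh key is the same as inserting the final value
lemma pv_insert_insert {κ ν : Type} [BEq κ] [LawfulBEq κ]
    (d : PySem.Dict κ ν) (k : κ) (v w : ν) (h : d.contains k = false) :
    (d.insert k v).insert k w = d.insert k w := by
  apply PySem.Dict.ext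
  have hk : ∀ p ∈ d.items, p.1 ≠ k := by
    intro p hp he
    have hm := PySem.Dict.mem_keys_of_mem_items d hp
    rw [he, ← PySem.Dict.contains_iff_mem_keys] at hm
    simp [hm] at h
  rw [PySem.Dict.items_insert_of_contains _ w (PySem.Dict.contains_insert_self d k v),
      PySem.Dict.items_insert_of_not_contains d v h,
      PySem.Dict.items_insert_of_not_contains d w h,
      List.map_append]
  congr 1
  · have : List.map (fun p => if (p.1 == k) = true then (k, w) else p) d.items
        = List.map id d.items := List.map_congr_left (by intro p hp; simp [hk p hp])
    rw [this, List.map_id]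
  · simp

-- pyRange with step k enumerates the multiples j*k, j = 1 .. b // k
lemma pv_pyRange_mul (b k : Int) (hk : 2 ≤ k) :
    PySem.List.pyRange k (b + 1) k
      = (PySem.List.pyRange 1 (PySem.Int.floordiv b k + 1) 1).map (· * k) := by
  rw [PySem.List.pyRange_of_pos _ _ (by omega), PySem.List.pyRange_one,
      PySem.Int.floordiv_eq_ediv_of_pos (by omega), List.map_map]
  have harg : b + 1 - k + k - 1 = b := by ring
  rw [harg]
  have hlen : (if k < b + 1 then (b / k).toNat else 0) = (b / k + 1 - 1).toNat := by
    split
    · omega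
    · have hbk : b < k := by omega
      have : b / k ≤ 0 := by
        rcases Int.lt_or_le b 0 with hb | hb
        · have := Int.ediv_le_ediv (c := k) (by omega) (show b ≤ 0 by omega)
          simpa using this
        · rw [Int.ediv_eq_zero_of_lt hb hbk]
      omega
  rw [hlen]
  apply List.map_congr_left
  intro a _
  simp only [Function.comp_apply]
  ring

-- coupled inner loops: from a state whose processed multiples already carry the valuation,
-- A's propagation loop and B's direct-division loop produce the same state
lemma pv_inner_couple (b k : Int) (hk : 2 ≤ k) :
    ∀ (n : Nat) (j0 : Int) (s : PySem.Dict Int (PySem.Dict Int Int)), 1 ≤ j0 →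
      (PySem.Int.floordiv b k + 1 - j0).toNat = n →
      (∀ j', 1 ≤ j' → j' < j0 → ((s.getD (j' * k) PySem.Dict.empty).getD k 0) = pvVal k (j' * k)) →
      (PySem.List.pyRange j0 (PySem.Int.floordiv b k + 1) 1).foldl (fun d j =>
          if PySem.Int.mod j k = 0 then
            let v := (d.getD j PySem.Dict.empty).getD k 0 + 1
            d.modify (j * k) PySem.Dict.empty (fun inner => inner.insert k v)
          else
            d.modify (j * k) PySem.Dict.empty (fun inner => inner.insert k 1)) s
        = (PySem.List.pyRange j0 (PySem.Int.floordiv b k + 1) 1).foldl (fun d j =>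
            d.modify (j * k) PySem.Dict.empty
              (fun inner => inner.insert k (pvBDivLoop k 0 (j * k) (j * k).natAbs))) s := by
  intro n
  induction n with
  | zero =>
    intro j0 s hj0 hn hinv
    rw [PySem.List.pyRange_one_eq_nil (by omega)]
    rfl
  | succ n ih =>
    intro j0 s hj0 hn hinv
    have hlt : j0 < PySem.Int.floordiv b k + 1 := by omega
    have hj0k : 0 < j0 * k := mul_pos (by omega) (by omega)
    rw [PySem.List.pyRange_one_cons hlt]
    simp only [List.foldl_cons]
    have hBv : pvBDivLoop k 0 (j0 * k) (j0 * k).natAbs = pvVal k (j0 * k) := by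
      have := pvBDivLoop_eq hk ((j0 * k).natAbs) 0 (j0 * k) hj0k le_rfl
      omega
    have hstep : (if PySem.Int.mod j0 k = 0 then
          let v := (s.getD j0 PySem.Dict.empty).getD k 0 + 1
          s.modify (j0 * k) PySem.Dict.empty (fun inner => inner.insert k v)
        else s.modify (j0 * k) PySem.Dict.empty (fun inner => inner.insert k 1))
        = s.modify (j0 * k) PySem.Dict.empty
            (fun inner => inner.insert k (pvVal k (j0 * k))) := by
      by_cases hm : PySem.Int.mod j0 k = 0
      · rw [if_pos hm]
        rw [PySem.Int.mod_eq_zero_iff_dvd] at hm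
        obtain ⟨q, hq⟩ := hm
        have hq1 : 1 ≤ q := by nlinarith
        have hqlt : q < j0 := by nlinarith
        have hqk : q * k = j0 := by rw [hq]; ring
        have hiv := hinv q hq1 hqlt
        rw [hqk] at hiv
        simp only [hiv]
        have : pvVal k (j0 * k) = pvVal k j0 + 1 := pvVal_mul (by omega) (by omega)
        rw [this, ← hqk, mul_comm q k, ← hq]
      · rw [if_neg hm]
        simp only [PySem.Int.mod_eq_zero_iff_dvd] at hm
        have : pvVal k (j0 * k) = pvVal k j0 + 1 := pvVal_mul (by omega) (by omega)
        rw [this, pvVal_not_dvd hm]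
        norm_num
    rw [hstep, hBv]
    apply ih (j0 + 1) _ (by omega) (by omega)
    intro j' h1 h2
    rw [PySem.Dict.getD_modify]
    by_cases he : j' * k = j0 * k
    · rw [if_pos he]
      have hje : j' = j0 := mul_right_cancel₀ (show (k:Int) ≠ 0 by omega) he
      rw [PySem.Dict.getD_insert_self, hje]
    · rw [if_neg he]
      have hje : j' ≠ j0 := fun hh => he (by rw [hh])
      exact hinv j' h1 (by omega)

-- one full outer step at a fresh prime k: A's step equals B's step
lemma pv_step_couple (b k : Int) (hk : 2 ≤ k) (hkb : k ≤ b)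
    (s : PySem.Dict Int (PySem.Dict Int Int)) (hc : s.contains k = false) :
    pvInnerA b k (s.insert k PySem.Dict.empty) = pvInnerB b k s := by
  unfold pvInnerA pvInnerB
  rw [pv_pyRange_mul b k hk, List.foldl_map]
  have hfd1 : 1 ≤ PySem.Int.floordiv b k := by
    rw [PySem.Int.le_floordiv_iff_mul_le (by omega)]
    linarith
  rw [PySem.List.pyRange_one_cons (by omega)]
  simp only [List.foldl_cons]
  have hm1 : PySem.Int.mod 1 k = 1 := by
    rw [PySem.Int.mod_eq_emod_of_pos (by omega)]
    exact Int.emod_eq_of_lt (by omega) (by omega)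
  have hndvd : ¬ (k ∣ (1:Int)) := fun hd => absurd (Int.le_of_dvd one_pos hd) (by omega)
  have hvk : pvVal k k = 1 := by
    have : pvVal k (1 * k) = pvVal k 1 + 1 := pvVal_mul (by omega) one_pos
    rw [one_mul] at this
    rw [this, pvVal_not_dvd hndvd]
    norm_num
  have hbv : pvBDivLoop k 0 (1 * k) ((1:Int) * k).natAbs = 1 := by
    rw [one_mul]
    have := pvBDivLoop_eq hk (k.natAbs) 0 k (by omega) le_rfl
    omega
  have hfirst :
      (if PySem.Int.mod 1 k = 0 then
        let v := ((s.insert k PySem.Dict.empty).getD 1 PySem.Dict.empty).getD k 0 + 1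
        (s.insert k PySem.Dict.empty).modify (1 * k) PySem.Dict.empty (fun inner => inner.insert k v)
      else (s.insert k PySem.Dict.empty).modify (1 * k) PySem.Dict.empty (fun inner => inner.insert k 1))
      = s.insert k (PySem.Dict.empty.insert k 1) := by
    rw [hm1, if_neg one_ne_zero, one_mul]
    simp only [PySem.Dict.modify]
    rw [PySem.Dict.getD_insert_self]
    exact pv_insert_insert s k PySem.Dict.empty (PySem.Dict.empty.insert k 1) hc
  have hfirstB :
      s.modify (1 * k) PySem.Dict.empty
        (fun inner => inner.insert k (pvBDivLoop k 0 (1 * k) ((1:Int) * k).natAbs))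
      = s.insert k (PySem.Dict.empty.insert k 1) := by
    rw [hbv, one_mul]
    simp only [PySem.Dict.modify]
    rw [PySem.Dict.getD_of_not_contains _ _ hc]
  rw [hfirst, hfirstB]
  apply pv_inner_couple b k hk ((PySem.Int.floordiv b k + 1 - 2).toNat) 2 _ (by omega) rfl
  intro j' h1 h2
  have : j' = 1 := by omega
  subst this
  rw [one_mul, PySem.Dict.getD_insert_self, PySem.Dict.getD_insert_self, hvk]

-- keys of B's inner loop
lemma pv_contains_innerB (b k : Int) (s : PySem.Dict Int (PySem.Dict Int Int)) (m : Int) :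
    (pvInnerB b k s).contains m = true ↔
      s.contains m = true ∨ m ∈ PySem.List.pyRange k (b + 1) k := by
  unfold pvInnerB
  rw [PySem.Dict.contains_iff_mem_keys,
      PySem.Dict.keys_foldl_modify (PySem.List.pyRange k (b + 1) k) PySem.Dict.empty
        (fun _ m inner => inner.insert k (pvBDivLoop k 0 m m.natAbs)) s,
      PySem.Set.mem_update, ← PySem.Dict.contains_iff_mem_keys]

-- nonemptiness survives B's inner loop
lemma pv_innerB_good (b k : Int) (s : PySem.Dict Int (PySem.Dict Int Int))
    (hs : ∀ m, s.contains m = true → (s.getD m PySem.Dict.empty).size ≠ 0) :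
    ∀ m, (pvInnerB b k s).contains m = true →
      ((pvInnerB b k s).getD m PySem.Dict.empty).size ≠ 0 := by
  unfold pvInnerB
  generalize PySem.List.pyRange k (b + 1) k = l
  induction l generalizing s with
  | nil => exact hs
  | cons m0 l ih =>
    simp only [List.foldl_cons]
    apply ih
    intro m hm
    rw [PySem.Dict.getD_modify]
    by_cases he : m = m0
    · rw [if_pos he]
      exact pv_size_insert_ne_zero _ _ _
    · rw [if_neg he]
      apply hs
      rw [PySem.Dict.contains_modify] at hm
      simpa [he] using hm

-- the master outer induction
lemma pv_master (b : Int) : ∀ (n : Nat), (2 + (n : Int)) ≤ b + 1 →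
    ((PySem.List.pyRange 2 (2 + (n : Int)) 1).foldl (pvStepA b) PySem.Dict.empty
        = (PySem.List.pyRange 2 (2 + (n : Int)) 1).foldl (pvStepB b) PySem.Dict.empty)
    ∧ (∀ m, ((PySem.List.pyRange 2 (2 + (n : Int)) 1).foldl (pvStepB b) PySem.Dict.empty).contains m = true
        ↔ (2 ≤ m ∧ m ≤ b ∧ ∃ d, 2 ≤ d ∧ d < 2 + (n : Int) ∧ d ∣ m))
    ∧ (∀ m, ((PySem.List.pyRange 2 (2 + (n : Int)) 1).foldl (pvStepB b) PySem.Dict.empty).contains m = true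
        → (((PySem.List.pyRange 2 (2 + (n : Int)) 1).foldl (pvStepB b) PySem.Dict.empty).getD m PySem.Dict.empty).size ≠ 0) := by
  intro n
  induction n with
  | zero =>
    intro _
    simp only [Nat.cast_zero, add_zero]
    rw [PySem.List.pyRange_one_eq_nil le_rfl]
    refine ⟨rfl, ?_, ?_⟩
    · intro m
      simp only [List.foldl_nil, PySem.Dict.contains_empty]
      constructor
      · intro h; cases h
      · rintro ⟨-, -, d, hd2, hdlt, -⟩; omega
    · intro m h
      rw [List.foldl_nil, PySem.Dict.contains_empty] at h
      cases h
  | succ n ih =>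
    intro hb
    have hn0 : 0 ≤ (n : Int) := Int.natCast_nonneg n
    have hcast : (2 + ((n + 1 : Nat) : Int)) = (2 + (n : Int)) + 1 := by push_cast; ring
    rw [hcast]
    rw [hcast] at hb
    have hk2 : (2:Int) ≤ 2 + (n : Int) := by omega
    have hkb : 2 + (n : Int) ≤ b := by omega
    obtain ⟨hAB, hchar, hgood⟩ := ih (by omega)
    have hsplit : PySem.List.pyRange 2 (2 + (n : Int) + 1) 1
        = PySem.List.pyRange 2 (2 + (n : Int)) 1 ++ [2 + (n : Int)] :=
      PySem.List.pyRange_one_succ_right (by omega)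
    rw [hsplit, List.foldl_append, List.foldl_append, hAB]
    simp only [List.foldl_cons, List.foldl_nil]
    generalize hgen : List.foldl (pvStepB b) PySem.Dict.empty
      (PySem.List.pyRange 2 (2 + (n : Int)) 1) = s at hchar hgood ⊢
    refine ⟨?_, ?_, ?_⟩
    · by_cases hc : s.contains (2 + (n : Int)) = true
      · simp only [pvStepA, pvStepB, hc, if_true]
        rw [if_neg (hgood _ hc)]
      · have hc' := Bool.not_eq_true _ |>.mp hc
        simp only [pvStepA, pvStepB, hc', Bool.false_eq_true, if_false]
        rw [if_pos (by rw [PySem.Dict.getD_insert_self]; rfl)]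
        exact pv_step_couple b _ hk2 hkb _ hc'
    · intro m
      by_cases hc : s.contains (2 + (n : Int)) = true
      · unfold pvStepB
        rw [if_pos hc, hchar m]
        obtain ⟨-, -, d0, hd02, hd0k, hd0dvd⟩ := (hchar _).mp hc
        constructor
        · rintro ⟨h2, hmb, d, hd2, hdlt, hdvd⟩
          exact ⟨h2, hmb, d, hd2, by omega, hdvd⟩
        · rintro ⟨h2, hmb, d, hd2, hdlt, hdvd⟩
          by_cases hdk : d = 2 + (n : Int)
          · exact ⟨h2, hmb, d0, hd02, hd0k, hd0dvd.trans (hdk ▸ hdvd)⟩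
          · exact ⟨h2, hmb, d, hd2, by omega, hdvd⟩
      · unfold pvStepB
        rw [if_neg hc, pv_contains_innerB, hchar m,
            PySem.List.mem_pyRange_iff_of_pos (by omega)]
        have hdvd_iff : ((2 + (n : Int)) ∣ m - (2 + (n : Int))) ↔ (2 + (n : Int)) ∣ m := by
          constructor
          · intro h; have := dvd_add h (dvd_refl (2 + (n : Int))); simpa using this
          · intro h; exact dvd_sub h (dvd_refl _)
        rw [hdvd_iff]
        constructor
        · rintro (⟨h2, hmb, d, hd2, hdlt, hdvd⟩ | ⟨hkm, hmb1, hdvd⟩)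
          · exact ⟨h2, hmb, d, hd2, by omega, hdvd⟩
          · exact ⟨by omega, by omega, 2 + (n : Int), hk2, by omega, hdvd⟩
        · rintro ⟨h2, hmb, d, hd2, hdlt, hdvd⟩
          by_cases hdk : d = 2 + (n : Int)
          · right
            subst hdk
            exact ⟨Int.le_of_dvd (by omega) hdvd, by omega, hdvd⟩
          · left
            exact ⟨h2, hmb, d, hd2, by omega, hdvd⟩
    · intro m
      by_cases hc : s.contains (2 + (n : Int)) = true
      · unfold pvStepB
        rw [if_pos hc]
        exact hgood m
      · unfold pvStepB
        rw [if_neg hc]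
        exact pv_innerB_good b _ _ hgood m

-- ===== VERDICT (by name: the statement is the Claim_ definition above) =====
theorem factor_all_spec : Claim_equal_factor_all := by
  intro b _
  unfold Spec_factor_all factor_all factor_all_alt
  by_cases hb : 1 ≤ b
  · obtain ⟨n, hn⟩ : ∃ n : Nat, b + 1 = 2 + (n : Int) := ⟨(b - 1).toNat, by omega⟩
    rw [hn, (pv_master b n (le_of_eq hn.symm)).1]
  · rw [PySem.List.pyRange_one_eq_nil (by omega)]
    simp
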